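-- pv_equiv track=rewrite | github.com/josecatela/sgcodewars | day6/day6.py | Oleksandra_Chmel_day5
-- ===== SOURCE A (Python) =====
-- def Oleksandra_Chmel_day5(customers, n):
--     people = len(customers)
--     tills = [0] * n
--     if people == 0:
--         return 0
--     elif n == 1:
--         return sum(customers)
--     elif people <= n:
--         return max(customers)
--     else:
--         for i in customers:
--             tills[0] += i
--             tills.sort()
--         return max(tills)
-- ===== SOURCE B (Python) =====
-- def Oleksandra_Chmel_day5(customers, n):
--     people = len(customers)
--     if people == 0:
--         return 0
--     if n == 1:
--         return sum(customers)
--     if people <= n: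
--         return max(customers)
--
--     # skew-heap of till loads: node = (value, left, right), None = empty heap
--     def merge(a, b):
--         if a is None:
--             return b
--         if b is None:
--             return a
--         if b[0] < a[0]:
--             a, b = b, a
--         # a has the smaller root; swap a's children and merge b into the old right
--         return (a[0], merge(a[2], b), a[1])
--
--     heap = None
--     for _ in range(n):
--         heap = merge(heap, (0, None, None))
--     for c in customers:
--         v, l, r = heap
--         heap = merge(merge(l, r), (v + c, None, None))
--
--     # maximum load = fold over the whole heap
--     def hmax(t):
--         m = t[0]
--         if t[1] is not None:
--             m2 = hmax(t[1])
--             m = m2 if m2 > m else m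
--         if t[2] is not None:
--             m2 = hmax(t[2])
--             m = m2 if m2 > m else m
--         return m
--
--     return hmax(heap)
-- ===== Notes on version B (the rewrite author's own statement) =====
-- stated objective: faster
-- what changed: Replaces A's simulation that mutates the head and re-sorts the whole tills list after every customer by a skew heap (merge-based priority queue) of till loads: pop the minimum, push it back increased, and take the maximum by folding over the heap at the end.
import Mathlib
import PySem

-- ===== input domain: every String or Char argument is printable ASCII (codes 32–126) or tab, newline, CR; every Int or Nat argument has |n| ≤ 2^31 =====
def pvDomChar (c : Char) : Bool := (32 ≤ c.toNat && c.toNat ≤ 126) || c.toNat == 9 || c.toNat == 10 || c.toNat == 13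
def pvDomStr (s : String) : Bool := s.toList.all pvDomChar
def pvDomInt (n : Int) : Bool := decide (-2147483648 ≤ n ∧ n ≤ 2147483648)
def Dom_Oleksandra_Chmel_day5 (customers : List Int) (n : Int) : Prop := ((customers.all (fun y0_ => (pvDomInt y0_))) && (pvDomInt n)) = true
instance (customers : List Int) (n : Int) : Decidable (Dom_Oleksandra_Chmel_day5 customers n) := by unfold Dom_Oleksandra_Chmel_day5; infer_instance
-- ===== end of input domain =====

-- B replaces A's re-sort-the-whole-list-per-customer simulation by a skew heap of
-- till loads (merge-based priority queue): alternative data structure, same values.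

-- ===== PORT A =====
-- for i in customers: tills[0] += i; tills.sort()
def Oleksandra_Chmel_day5 (customers : List Int) (n : Int) : Int :=
  let people : Int := customers.length
  let tills : List Int := List.replicate n.toNat 0
  if people = 0 then 0
  else if n = 1 then customers.sum
  else if people ≤ n then (PySem.List.max? customers (fun x => x)).getD 0  -- customers ≠ [] here, default unreachable
  else
    let tills' := customers.foldl
      (fun ts i => PySem.List.sorted (PySem.List.pySetD ts 0 (PySem.List.pyGetD ts 0 0 + i)) (fun x => x) false) tills
    (PySem.List.max? tills' (fun x => x)).getD 0  -- tills' ≠ [] under Pre_, default unreachable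

-- ===== PORT B =====
-- node = (value, left, right), None = empty heap
inductive PvHeap : Type
  | leaf : PvHeap
  | node : Int → PvHeap → PvHeap → PvHeap
deriving DecidableEq, Repr

def PvHeap.size : PvHeap → Nat
  | .leaf => 0
  | .node _ l r => l.size + r.size + 1

-- Source B's merge: the smaller root wins; its children are swapped and the other
-- heap is merged into the old right child (skew-heap merge)
def pvMerge : PvHeap → PvHeap → PvHeap
  | .leaf, b => b
  | .node x al ar, .leaf => .node x al ar
  | .node x al ar, .node y bl br =>
    if y < x then .node y (pvMerge br (.node x al ar)) bl
    else .node x (pvMerge ar (.node y bl br)) al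
termination_by a b => a.size + b.size
decreasing_by all_goals (simp [PvHeap.size]; try omega)

-- Source B's hmax: the maximum value anywhere in the heap (python only calls it on a
-- node; the .leaf branch is an unreachable default)
def pvHmax : PvHeap → Int
  | .leaf => 0
  | .node v l r =>
    let m := match l with
      | .leaf => v
      | .node la ll lr =>
        let m2 := pvHmax (.node la ll lr)
        if m2 > v then m2 else v
    match r with
    | .leaf => m
    | .node ra rl rr =>
      let m2 := pvHmax (.node ra rl rr)
      if m2 > m then m2 else m

def Oleksandra_Chmel_day5_alt (customers : List Int) (n : Int) : Int :=
  let people : Int := customers.length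
  if people = 0 then 0
  else if n = 1 then customers.sum
  else if people ≤ n then (PySem.List.max? customers (fun x => x)).getD 0
  else
    -- for _ in range(n): heap = merge(heap, (0, None, None))
    let heap := (PySem.List.pyRange 0 n 1).foldl
      (fun h _ => pvMerge h (.node 0 .leaf .leaf)) .leaf
    -- for c in customers: v,l,r = heap; heap = merge(merge(l, r), (v+c, None, None))
    let heap' := customers.foldl
      (fun h c =>
        match h with
        | .leaf => .leaf  -- unreachable under Pre_: the heap is never empty here
        | .node v l r => pvMerge (pvMerge l r) (.node (v + c) .leaf .leaf)) heap
    pvHmax heap'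

-- ===== PRECONDITION & SPEC =====
-- Pre_ excludes exactly the inputs where Python A raises IndexError:
-- customers nonempty with n ≤ 0 ([0]*n is empty, so tills[0] += i raises).
def Pre_Oleksandra_Chmel_day5 (customers : List Int) (n : Int) : Prop :=
  customers = [] ∨ 1 ≤ n
instance (customers : List Int) (n : Int) : Decidable (Pre_Oleksandra_Chmel_day5 customers n) := by unfold Pre_Oleksandra_Chmel_day5; infer_instance

def pvWitness_Oleksandra_Chmel_day5 : List Int × Int := ([5, 3, 4], 2)

def Spec_Oleksandra_Chmel_day5 (customers : List Int) (n : Int) (out : Int) : Prop := out = Oleksandra_Chmel_day5_alt customers n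
instance (customers : List Int) (n : Int) (out : Int) : Decidable (Spec_Oleksandra_Chmel_day5 customers n out) := by unfold Spec_Oleksandra_Chmel_day5; infer_instance

-- ===== CLAIM (what is proved, stated in full; the proofs are below) =====
def Claim_equal_Oleksandra_Chmel_day5 : Prop := ∀ (customers : List Int) (n : Int), Dom_Oleksandra_Chmel_day5 customers n → Pre_Oleksandra_Chmel_day5 customers n → Spec_Oleksandra_Chmel_day5 customers n (Oleksandra_Chmel_day5 customers n)

-- ===== LEMMAS AND PROOFS =====

-- the multiset of values stored in a heap
def pvToMS : PvHeap → Multiset Int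
  | .leaf => 0
  | .node v l r => v ::ₘ (pvToMS l + pvToMS r)

-- the min-heap property: each root is ≤ everything below it
def pvIsHeap : PvHeap → Prop
  | .leaf => True
  | .node v l r => (∀ x ∈ pvToMS l, v ≤ x) ∧ (∀ x ∈ pvToMS r, v ≤ x) ∧ pvIsHeap l ∧ pvIsHeap r

theorem pvToMS_merge (a b : PvHeap) : pvToMS (pvMerge a b) = pvToMS a + pvToMS b := by
  induction a, b using pvMerge.induct with
  | case1 b => simp [pvMerge, pvToMS]
  | case2 x al ar => simp [pvMerge, pvToMS]
  | case3 x al ar y bl br h ih =>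
    simp only [pvMerge, if_pos h, pvToMS, ih]
    ext z; simp [Multiset.count_cons, Multiset.count_add]; ring
  | case4 x al ar y bl br h ih =>
    simp only [pvMerge, if_neg h, pvToMS, ih]
    ext z; simp [Multiset.count_cons, Multiset.count_add]; ring

theorem pvRoot_le (v : Int) (l r : PvHeap) (h : pvIsHeap (.node v l r)) :
    ∀ x ∈ pvToMS (.node v l r), v ≤ x := by
  rcases h with ⟨hl, hr, _, _⟩
  intro x hx
  simp only [pvToMS, Multiset.mem_cons, Multiset.mem_add] at hx
  rcases hx with rfl | hx | hx
  · exact le_rfl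
  · exact hl x hx
  · exact hr x hx

theorem pvMerge_isHeap (a b : PvHeap) (ha : pvIsHeap a) (hb : pvIsHeap b) :
    pvIsHeap (pvMerge a b) := by
  induction a, b using pvMerge.induct with
  | case1 b => simpa [pvMerge]
  | case2 x al ar => simpa [pvMerge]
  | case3 x al ar y bl br h ih =>
    simp only [pvMerge, if_pos h]
    rcases hb with ⟨hbl, hbr, hbl2, hbr2⟩
    refine ⟨?_, hbl, ih hbr2 ha, hbl2⟩
    intro z hz
    rw [pvToMS_merge] at hz
    rcases Multiset.mem_add.mp hz with hz | hz
    · exact hbr z hz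
    · exact le_trans (le_of_lt h) (pvRoot_le x al ar ha z hz)
  | case4 x al ar y bl br h ih =>
    simp only [pvMerge, if_neg h]
    rcases ha with ⟨hal, har, hal2, har2⟩
    refine ⟨?_, hal, ih har2 hb, hal2⟩
    intro z hz
    rw [pvToMS_merge] at hz
    rcases Multiset.mem_add.mp hz with hz | hz
    · exact har z hz
    · exact le_trans (by omega) (pvRoot_le y bl br hb z hz)

theorem pv_mem_node (x v : Int) (l r : PvHeap) :
    x ∈ pvToMS (.node v l r) ↔ x = v ∨ x ∈ pvToMS l ∨ x ∈ pvToMS r := by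
  simp [pvToMS]

theorem pvHmax_ll (v : Int) : pvHmax (.node v .leaf .leaf) = v := rfl

theorem pvHmax_ln (v ra : Int) (rl rr : PvHeap) :
    pvHmax (.node v .leaf (.node ra rl rr))
      = if pvHmax (.node ra rl rr) > v then pvHmax (.node ra rl rr) else v := rfl

theorem pvHmax_nl (v la : Int) (ll lr : PvHeap) :
    pvHmax (.node v (.node la ll lr) .leaf)
      = if pvHmax (.node la ll lr) > v then pvHmax (.node la ll lr) else v := rfl

theorem pvHmax_nn (v la ra : Int) (ll lr rl rr : PvHeap) :
    pvHmax (.node v (.node la ll lr) (.node ra rl rr))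
      = if pvHmax (.node ra rl rr) > (if pvHmax (.node la ll lr) > v then pvHmax (.node la ll lr) else v)
        then pvHmax (.node ra rl rr)
        else (if pvHmax (.node la ll lr) > v then pvHmax (.node la ll lr) else v) := rfl

theorem pvHmax_spec (t : PvHeap) (h : t ≠ .leaf) :
    pvHmax t ∈ pvToMS t ∧ ∀ x ∈ pvToMS t, x ≤ pvHmax t := by
  induction t with
  | leaf => exact absurd rfl h
  | node v l r ihl ihr =>
    rcases l with _ | ⟨la, ll, lr⟩ <;> rcases r with _ | ⟨ra, rl, rr⟩
    · refine ⟨by rw [pvHmax_ll, pv_mem_node]; left; rfl, ?_⟩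
      intro x hx
      rw [pv_mem_node] at hx
      rcases hx with rfl | hx | hx
      · rw [pvHmax_ll]
      · exact absurd hx (by simp [pvToMS])
      · exact absurd hx (by simp [pvToMS])
    · obtain ⟨mR, bR⟩ := ihr (by simp)
      constructor
      · rw [pvHmax_ln, pv_mem_node]
        split_ifs
        · right; right; exact mR
        · left; rfl
      · intro x hx
        rw [pv_mem_node] at hx
        rw [pvHmax_ln]
        rcases hx with rfl | hx | hx
        · split_ifs <;> omega
        · exact absurd hx (by simp [pvToMS])
        · have := bR x hx; split_ifs <;> omega
    · obtain ⟨mL, bL⟩ := ihl (by simp)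
      constructor
      · rw [pvHmax_nl, pv_mem_node]
        split_ifs
        · right; left; exact mL
        · left; rfl
      · intro x hx
        rw [pv_mem_node] at hx
        rw [pvHmax_nl]
        rcases hx with rfl | hx | hx
        · split_ifs <;> omega
        · have := bL x hx; split_ifs <;> omega
        · exact absurd hx (by simp [pvToMS])
    · obtain ⟨mL, bL⟩ := ihl (by simp)
      obtain ⟨mR, bR⟩ := ihr (by simp)
      constructor
      · rw [pvHmax_nn, pv_mem_node]
        split_ifs
        · right; right; exact mR
        · right; left; exact mL
        · right; right; exact mR
        · left; rfl
      · intro x hx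
        rw [pv_mem_node] at hx
        rw [pvHmax_nn]
        rcases hx with rfl | hx | hx
        · split_ifs <;> omega
        · have := bL x hx; split_ifs <;> omega
        · have := bR x hx; split_ifs <;> omega

-- building the initial heap of n zeros
theorem pv_init (xs : List Int) (t : PvHeap) (ht : pvIsHeap t) :
    pvIsHeap (xs.foldl (fun h _ => pvMerge h (.node 0 .leaf .leaf)) t) ∧
    pvToMS (xs.foldl (fun h _ => pvMerge h (.node 0 .leaf .leaf)) t)
      = pvToMS t + Multiset.replicate xs.length 0 := by
  induction xs generalizing t with
  | nil => simp [ht]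
  | cons x xs ih =>
    have h1 : pvIsHeap (pvMerge t (.node 0 .leaf .leaf)) :=
      pvMerge_isHeap _ _ ht (by simp [pvIsHeap, pvToMS])
    obtain ⟨h2, h3⟩ := ih (pvMerge t (.node 0 .leaf .leaf)) h1
    refine ⟨h2, ?_⟩
    rw [List.foldl_cons] at *
    rw [h3, pvToMS_merge]
    simp [pvToMS, Multiset.replicate_succ]
    ext z
    simp [Multiset.count_cons, Multiset.count_add, Multiset.count_singleton,
      Multiset.count_replicate]
    split_ifs <;> omega

-- in a Pairwise-(≤) cons the head is ≤ every element
theorem pv_head_le (h : Int) (tl : List Int) (hs : (h :: tl).Pairwise (· ≤ ·)) :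
    ∀ y ∈ h :: tl, h ≤ y := by
  intro y hy
  rcases List.mem_cons.mp hy with rfl | hy
  · exact le_rfl
  · exact (List.pairwise_cons.mp hs).1 y hy

-- one A-step on a sorted nonempty list, as a multiset
theorem pv_stepA (h : Int) (tl : List Int) (c : Int) :
    let out := PySem.List.sorted (PySem.List.pySetD (h :: tl) 0 (PySem.List.pyGetD (h :: tl) 0 0 + c)) (fun x => x) false
    out ≠ [] ∧ out.Pairwise (· ≤ ·) ∧ (↑out : Multiset Int) = (h + c) ::ₘ ↑tl := by
  have h0 : PySem.List.pyGetD (h :: tl) 0 0 = h := by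
    simp [PySem.List.pyGetD_zero_cons]
  have h1 : PySem.List.pySetD (h :: tl) 0 (h + c) = (h + c) :: tl := by
    simp [PySem.List.pySetD, PySem.List.pySet?, PySem.List.pyIdx?]
  refine ⟨?_, ?_, ?_⟩
  · rw [h0, h1]; simp [PySem.List.sorted_eq_nil_iff]
  · exact PySem.List.sorted_pairwise _ _
  · rw [h0, h1]
    exact Multiset.coe_eq_coe.mpr (PySem.List.sorted_perm _ _ _)

-- the loop invariant: A's sorted list and B's heap always carry the same multiset
theorem pv_loop (cs : List Int) (ts : List Int) (t : PvHeap)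
    (hne : ts ≠ []) (hs : ts.Pairwise (· ≤ ·)) (hh : pvIsHeap t)
    (hm : pvToMS t = ↑ts) :
    let tsF := cs.foldl (fun ts i => PySem.List.sorted (PySem.List.pySetD ts 0 (PySem.List.pyGetD ts 0 0 + i)) (fun x => x) false) ts
    let tF := cs.foldl (fun h c => match h with
        | PvHeap.leaf => PvHeap.leaf
        | PvHeap.node v l r => pvMerge (pvMerge l r) (.node (v + c) .leaf .leaf)) t
    tsF ≠ [] ∧ tsF.Pairwise (· ≤ ·) ∧ pvIsHeap tF ∧ pvToMS tF = ↑tsF := by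
  induction cs generalizing ts t with
  | nil => exact ⟨hne, hs, hh, hm⟩
  | cons c cs ih =>
    obtain ⟨h, tl, rfl⟩ := List.exists_cons_of_ne_nil hne
    obtain ⟨v, l, r, rfl⟩ : ∃ v l r, t = PvHeap.node v l r := by
      rcases t with _ | ⟨v, l, r⟩
      · exfalso
        have : (h : Int) ∈ pvToMS PvHeap.leaf := by rw [hm]; simp
        simp [pvToMS] at this
      · exact ⟨v, l, r, rfl⟩
    -- the two minima coincide
    have hveq : v = h := by
      have hv_mem : v ∈ (h :: tl) := by
        have : v ∈ pvToMS (PvHeap.node v l r) := by simp [pvToMS]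
        rw [hm] at this; exact Multiset.mem_coe.mp this
      have hh_mem : (h : Int) ∈ pvToMS (PvHeap.node v l r) := by
        rw [hm]; exact Multiset.mem_coe.mpr (List.mem_cons_self ..)
      exact le_antisymm (pvRoot_le v l r hh h hh_mem) (pv_head_le h tl hs v hv_mem)
    obtain ⟨hne', hs', hms'⟩ := pv_stepA h tl c
    have hrest : pvToMS l + pvToMS r = (↑tl : Multiset Int) := by
      have : v ::ₘ (pvToMS l + pvToMS r) = h ::ₘ (↑tl : Multiset Int) := by
        have := hm; simp only [pvToMS] at this; rw [this]; rfl
      rw [hveq] at this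
      exact (Multiset.cons_inj_right h).mp this
    have hh' : pvIsHeap (pvMerge (pvMerge l r) (.node (v + c) .leaf .leaf)) := by
      rcases hh with ⟨h1, h2, h3, h4⟩
      exact pvMerge_isHeap _ _ (pvMerge_isHeap _ _ h3 h4) (by simp [pvIsHeap, pvToMS])
    have hm' : pvToMS (pvMerge (pvMerge l r) (.node (v + c) .leaf .leaf))
        = ↑(PySem.List.sorted (PySem.List.pySetD (h :: tl) 0 (PySem.List.pyGetD (h :: tl) 0 0 + c)) (fun x => x) false) := by
      rw [hms', pvToMS_merge, pvToMS_merge, hrest, hveq]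
      simp [pvToMS]
      ext z
      simp [Multiset.count_add, Multiset.count_singleton,
        Multiset.coe_count, List.count_cons]
      split_ifs <;> omega
    simpa using ih _ _ hne' hs' hh' hm'

-- equal multisets have the same maximum: A's max(list) = B's hmax(heap)
theorem pv_max_eq (ts : List Int) (t : PvHeap) (hne : ts ≠ []) (htne : t ≠ .leaf)
    (hm : pvToMS t = ↑ts) :
    (PySem.List.max? ts (fun x => x)).getD 0 = pvHmax t := by
  obtain ⟨m, hmx⟩ : ∃ m, PySem.List.max? ts (fun x => x) = some m := by
    rcases hx : PySem.List.max? ts (fun x => x) with _ | m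
    · exact absurd ((PySem.List.max?_eq_none_iff ts _).mp hx) hne
    · exact ⟨m, rfl⟩
  rw [hmx]
  obtain ⟨hmem, hmax⟩ := pvHmax_spec t htne
  rw [hm] at hmem hmax
  have h1 : pvHmax t ≤ m := PySem.List.max?_isMax hmx _ (Multiset.mem_coe.mp hmem)
  have h2 : m ≤ pvHmax t := hmax m (Multiset.mem_coe.mpr (PySem.List.max?_mem hmx))
  exact le_antisymm h2 h1

-- ===== VERDICT (by name: the statement is the Claim_ definition above) =====
theorem Oleksandra_Chmel_day5_spec : Claim_equal_Oleksandra_Chmel_day5 := by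
  intro customers n _ hpre
  unfold Spec_Oleksandra_Chmel_day5 Oleksandra_Chmel_day5 Oleksandra_Chmel_day5_alt
  by_cases h0 : (customers.length : Int) = 0
  · simp [h0]
  · simp only [h0, if_false]
    by_cases h1 : n = 1
    · simp [h1]
    · simp only [h1, if_false]
      by_cases h2 : (customers.length : Int) ≤ n
      · simp [h2]
      · simp only [h2, if_false]
        have hn : 2 ≤ n := by
          rcases hpre with hc | hn
          · simp [hc] at h0
          · omega
        -- the initial states: n zeros on both sides
        obtain ⟨hih, him⟩ := pv_init (PySem.List.pyRange 0 n 1) .leaf trivial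
        have hlen : (PySem.List.pyRange 0 n 1).length = n.toNat := by
          rw [PySem.List.length_pyRange_one]; omega
        have hm0 : pvToMS ((PySem.List.pyRange 0 n 1).foldl
            (fun h _ => pvMerge h (.node 0 .leaf .leaf)) .leaf)
            = ↑(List.replicate n.toNat (0 : Int)) := by
          rw [him, hlen]
          simp [pvToMS, Multiset.coe_replicate]
        have hne : List.replicate n.toNat (0 : Int) ≠ [] := by
          simp [List.replicate_eq_nil_iff]; omega
        have hs : (List.replicate n.toNat (0 : Int)).Pairwise (· ≤ ·) :=
          List.pairwise_replicate.mpr (Or.inr le_rfl)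
        obtain ⟨hne', hs', hh', hm'⟩ :=
          pv_loop customers (List.replicate n.toNat 0) _ hne hs hih hm0
        have htne' : (customers.foldl (fun h c => match h with
            | PvHeap.leaf => PvHeap.leaf
            | PvHeap.node v l r => pvMerge (pvMerge l r) (.node (v + c) .leaf .leaf))
            ((PySem.List.pyRange 0 n 1).foldl (fun h _ => pvMerge h (.node 0 .leaf .leaf)) .leaf)) ≠ .leaf := by
          intro hc
          rw [hc] at hm'
          have : (0 : Multiset Int) = ↑(customers.foldl (fun ts i => PySem.List.sorted (PySem.List.pySetD ts 0 (PySem.List.pyGetD ts 0 0 + i)) (fun x => x) false) (List.replicate n.toNat 0)) := by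
            simpa [pvToMS] using hm'
          exact hne' (by simpa using this.symm)
        exact pv_max_eq _ _ hne' htne' hm'
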